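-- pv_equiv track=rewrite | github.com/wkslearner/scikit_learn | score_card_version1/split_bin.py | build
-- ===== SOURCE A (Python) =====
-- def build(log_cnt):
--     log_dict = {}
--     for record in log_cnt:
--         if record[0] not in log_dict.keys():
--             log_dict[record[0]] = [0,0,0]
--         if record[1] == 0:
--             log_dict[record[0]][0] = record[2]
--         elif record[1] == 1:
--             log_dict[record[0]][1] = record[2]
--         elif record[1] == 2:
--             log_dict[record[0]][2] = record[2]
--         else:
--             raise TypeError('Data Exception')
--     #排序之后，字典类型数据自动转化为list
--     log_truple = sorted(log_dict.items())
--
--     return log_truple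
-- ===== SOURCE B (Python) =====
-- from itertools import groupby
--
--
-- def build(log_cnt):
--     out = []
--     for key, grp in groupby(sorted(log_cnt, key=lambda r: r[0]), key=lambda r: r[0]):
--         triple = [0, 0, 0]
--         for _, pos, val in grp:
--             if pos == 0:
--                 triple[0] = val
--             elif pos == 1:
--                 triple[1] = val
--             elif pos == 2:
--                 triple[2] = val
--             else:
--                 raise TypeError('Data Exception')
--         out.append((key, triple))
--     return out
-- ===== Notes on version B (the rewrite author's own statement) =====
-- stated objective: idiomatic
-- what changed: Replaces A's dict-accumulate-then-sort-items pipeline by sorting the records by key first and folding each consecutive equal-key run with itertools.groupby directly into (key, triple) pairs, with no intermediate dict and no separate sort of items.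
import Mathlib
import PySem

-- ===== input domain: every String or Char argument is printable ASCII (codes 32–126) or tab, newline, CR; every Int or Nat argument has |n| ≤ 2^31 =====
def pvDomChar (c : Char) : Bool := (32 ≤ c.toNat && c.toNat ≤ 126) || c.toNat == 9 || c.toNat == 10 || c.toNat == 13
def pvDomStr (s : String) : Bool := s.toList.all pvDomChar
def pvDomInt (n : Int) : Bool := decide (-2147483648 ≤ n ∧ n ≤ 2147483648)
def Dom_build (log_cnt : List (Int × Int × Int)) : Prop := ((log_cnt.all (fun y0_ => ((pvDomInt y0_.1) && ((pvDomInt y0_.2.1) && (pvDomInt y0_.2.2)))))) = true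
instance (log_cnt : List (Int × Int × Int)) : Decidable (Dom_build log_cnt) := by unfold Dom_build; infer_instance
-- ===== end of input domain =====

-- B replaces A's dict-accumulate-then-sort-items pipeline by sort-by-key + groupby run scan (no dict); equivalence of the return values.

-- ===== PORT A =====
-- one iteration of A's loop body: ensure the key maps to [0,0,0], then assign the slot named by record[1].
-- In the final 'else' Python raises TypeError (excluded by Pre_build); the port keeps the dict unchanged there.
def buildStep (d : PySem.Dict Int (List Int)) (r : Int × Int × Int) : PySem.Dict Int (List Int) :=
  let d1 := if d.contains r.1 then d else d.insert r.1 [0,0,0]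
  if r.2.1 = 0 then d1.insert r.1 ((d1.getD r.1 []).set 0 r.2.2)
  else if r.2.1 = 1 then d1.insert r.1 ((d1.getD r.1 []).set 1 r.2.2)
  else if r.2.1 = 2 then d1.insert r.1 ((d1.getD r.1 []).set 2 r.2.2)
  else d1

-- sorted(log_dict.items()): dict keys are distinct, so Python's lexicographic tuple sort
-- coincides with (stable) sorting by the first component.
def build (log_cnt : List (Int × Int × Int)) : List (Int × List Int) :=
  PySem.List.sorted ((log_cnt.foldl buildStep PySem.Dict.empty).items) (fun p => p.1)

-- ===== PORT B =====
-- the body of B's inner 'for _, pos, val in grp' loop (Python raises TypeError in the final else; excluded by Pre_build).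
def applyRec (t : List Int) (r : Int × Int × Int) : List Int :=
  if r.2.1 = 0 then t.set 0 r.2.2
  else if r.2.1 = 1 then t.set 1 r.2.2
  else if r.2.1 = 2 then t.set 2 r.2.2
  else t

-- itertools.groupby consumption: scan the sorted list once, folding the current run's triple;
-- when the key changes, emit (key, triple) and start a fresh [0,0,0].
def groupRun (k : Int) (t : List Int) : List (Int × Int × Int) → List (Int × List Int)
  | [] => [(k, t)]
  | r :: rs =>
      if r.1 == k then groupRun k (applyRec t r) rs
      else (k, t) :: groupRun r.1 (applyRec [0,0,0] r) rs

def groupOut : List (Int × Int × Int) → List (Int × List Int)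
  | [] => []
  | r :: rs => groupRun r.1 (applyRec [0,0,0] r) rs

def build_alt (log_cnt : List (Int × Int × Int)) : List (Int × List Int) :=
  groupOut (PySem.List.sorted log_cnt (fun r => r.1))

-- ===== PRECONDITION & SPEC =====
-- Pre_build excludes exactly the records whose middle component is not 0, 1 or 2:
-- there Python A raises TypeError('Data Exception') (and Python B raises it too).
def Pre_build (log_cnt : List (Int × Int × Int)) : Prop :=
  ∀ r ∈ log_cnt, r.2.1 = 0 ∨ r.2.1 = 1 ∨ r.2.1 = 2
instance (log_cnt : List (Int × Int × Int)) : Decidable (Pre_build log_cnt) := by unfold Pre_build; infer_instance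

def pvWitness_build : (List (Int × Int × Int)) := ([(1,0,5),(1,2,7),(0,1,3),(1,0,9)])

def Spec_build (log_cnt : List (Int × Int × Int)) (out : List (Int × List Int)) : Prop := out = build_alt log_cnt
instance (log_cnt : List (Int × Int × Int)) (out : List (Int × List Int)) : Decidable (Spec_build log_cnt out) := by unfold Spec_build; infer_instance

-- ===== CLAIM (what is proved, stated in full; the proofs are below) =====
def Claim_equal_build : Prop := ∀ (log_cnt : List (Int × Int × Int)), Dom_build log_cnt → Pre_build log_cnt → Spec_build log_cnt (build log_cnt)

-- ===== LEMMAS AND PROOFS =====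

-- the triple A's dict holds at key k ([0,0,0] while k is absent)
def gval (d : PySem.Dict Int (List Int)) (k : Int) : List Int :=
  if d.contains k then d.getD k [] else [0,0,0]

theorem gval_buildStep (d : PySem.Dict Int (List Int)) (r : Int × Int × Int) (k : Int) :
    gval (buildStep d r) k = if r.1 = k then applyRec (gval d k) r else gval d k := by
  unfold buildStep applyRec gval
  by_cases hk : r.1 = k
  · subst hk
    by_cases hc : d.contains r.1
    · simp only [hc, if_true]
      split_ifs <;>
        simp_all [PySem.Dict.contains_insert_self, PySem.Dict.getD_insert_self]
    · simp only [hc, Bool.false_eq_true, if_false, if_true]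
      split_ifs <;>
        simp_all [PySem.Dict.contains_insert_self, PySem.Dict.getD_insert_self,
          PySem.Dict.contains_insert]
  · have hne : k ≠ r.1 := fun h => hk h.symm
    by_cases hc : d.contains r.1
    · simp only [hc, if_true, hk, if_false]
      split_ifs <;>
        simp_all [PySem.Dict.contains_insert, PySem.Dict.getD_insert_of_ne _ _ _ hne, hne]
    · simp only [hc, Bool.false_eq_true, if_false, hk]
      split_ifs <;>
        simp_all [PySem.Dict.contains_insert, PySem.Dict.getD_insert_of_ne _ _ _ hne, hne]

theorem gval_foldl (lc : List (Int × Int × Int)) (d : PySem.Dict Int (List Int)) (k : Int) :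
    gval (lc.foldl buildStep d) k
      = (lc.filter (fun r => r.1 == k)).foldl applyRec (gval d k) := by
  induction lc generalizing d with
  | nil => rfl
  | cons r lc ih =>
    simp only [List.foldl_cons, List.filter_cons]
    by_cases hk : r.1 = k
    · rw [ih, gval_buildStep, if_pos hk]
      simp [hk]
    · rw [ih, gval_buildStep, if_neg hk]
      simp [hk]

theorem keys_buildStep (d : PySem.Dict Int (List Int)) (r : Int × Int × Int) :
    (buildStep d r).keys = PySem.Set.add d.keys r.1 := by
  unfold buildStep
  by_cases hc : d.contains r.1
  · have hm : PySem.Set.add d.keys r.1 = d.keys := by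
      unfold PySem.Set.add
      simp [PySem.Set.contains, (PySem.Dict.contains_iff_mem_keys d r.1).mp hc]
    rw [hm]
    simp only [hc, if_true]
    split_ifs <;> simp [PySem.Dict.keys_insert_of_contains _ _ hc]
  · have hc' : d.contains r.1 = false := by simpa using hc
    have hnm : r.1 ∉ d.keys := fun hmem => by
      simp [(PySem.Dict.contains_iff_mem_keys d r.1).mpr hmem] at hc'
    have hm : PySem.Set.add d.keys r.1 = d.keys ++ [r.1] := by
      unfold PySem.Set.add
      simp [PySem.Set.contains, hnm]
    rw [hm]
    have hc1 : (d.insert r.1 ([0,0,0] : List Int)).contains r.1 = true :=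
      PySem.Dict.contains_insert_self d r.1 _
    simp only [hc', Bool.false_eq_true, if_false]
    split_ifs <;>
      simp [PySem.Dict.keys_insert_of_contains _ _ hc1,
        PySem.Dict.keys_insert_of_not_contains _ _ hc']

theorem keys_foldl_buildStep (lc : List (Int × Int × Int)) (d : PySem.Dict Int (List Int)) :
    (lc.foldl buildStep d).keys = PySem.Set.update d.keys (lc.map (·.1)) := by
  induction lc generalizing d with
  | nil => rfl
  | cons r lc ih =>
    simp only [List.foldl_cons, List.map_cons, PySem.Set.update, List.foldl_cons]
    rw [ih, ← keys_buildStep]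
    rfl

theorem set_update_of_subset (l : List Int) (s : PySem.Set Int) (h : ∀ a ∈ l, a ∈ s) :
    PySem.Set.update s l = s := by
  induction l generalizing s with
  | nil => rfl
  | cons a l ih =>
    have ha : PySem.Set.add s a = s := by
      unfold PySem.Set.add
      simp [PySem.Set.contains, h a (by simp)]
    show PySem.Set.update (PySem.Set.add s a) l = s
    rw [ha]
    exact ih s (fun b hb => h b (by simp [hb]))

theorem set_cons_update (l : List Int) (x : Int) (s : PySem.Set Int) (hx : x ∉ l) :
    PySem.Set.update (x :: s) l = x :: PySem.Set.update s l := by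
  induction l generalizing s with
  | nil => rfl
  | cons a l ih =>
    have hax : ¬ (a = x) := fun h => hx (by simp [h])
    have ha : PySem.Set.add (x :: s) a = x :: PySem.Set.add s a := by
      unfold PySem.Set.add
      simp only [PySem.Set.contains, List.contains_cons]
      rw [show (a == x) = false by simp [hax]]
      simp only [Bool.false_or]
      split_ifs <;> rfl
    show PySem.Set.update (PySem.Set.add (x :: s) a) l = x :: PySem.Set.update (PySem.Set.add s a) l
    rw [ha]
    exact ih (PySem.Set.add s a) (fun h => hx (by simp [h]))

theorem set_update_sublist (l : List Int) (s : PySem.Set Int) :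
    List.Sublist (PySem.Set.update s l : List Int) (s ++ l) := by
  induction l generalizing s with
  | nil => simp [PySem.Set.update]
  | cons a l ih =>
    show List.Sublist (PySem.Set.update (PySem.Set.add s a) l) _
    unfold PySem.Set.add
    split_ifs with h
    · exact (ih s).trans (by
        refine List.Sublist.append_left ?_ s
        exact List.sublist_cons_self a l)
    · have := ih (s ++ [a])
      simpa using this

theorem set_ofList_sublist (l : List Int) : List.Sublist (PySem.Set.ofList l : List Int) l := by
  simpa using set_update_sublist l PySem.Set.empty

theorem groupRun_eq (rs : List (Int × Int × Int)) (k : Int) (t : List Int) :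
    groupRun k t rs
      = (k, (rs.takeWhile (fun s => s.1 == k)).foldl applyRec t)
          :: groupOut (rs.dropWhile (fun s => s.1 == k)) := by
  induction rs generalizing k t with
  | nil => rfl
  | cons r rs ih =>
    by_cases hk : r.1 = k
    · simp only [groupRun, hk, beq_self_eq_true, if_true, List.takeWhile_cons,
        List.dropWhile_cons]
      rw [ih]
      simp [hk]
    · simp only [groupRun, List.takeWhile_cons, List.dropWhile_cons]
      have : (r.1 == k) = false := by simp [hk]
      simp only [this, Bool.false_eq_true, if_false, List.foldl_nil]
      rfl

theorem filter_insertBy (x : Int × Int × Int) (acc : List (Int × Int × Int)) (k : Int)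
    (h : acc.Pairwise (fun a b => a.1 ≤ b.1)) :
    (PySem.List.insertBy (fun a b => decide (a.1 < b.1)) x acc).filter (fun r => r.1 == k)
      = if x.1 = k then acc.filter (fun r => r.1 == k) ++ [x]
        else acc.filter (fun r => r.1 == k) := by
  induction acc with
  | nil => by_cases hk : x.1 = k <;> simp [PySem.List.insertBy, hk]
  | cons y ys ih =>
    rw [List.pairwise_cons] at h
    obtain ⟨hy, hys⟩ := h
    by_cases hlt : x.1 < y.1
    · simp only [PySem.List.insertBy, decide_eq_true_eq, if_pos hlt]
      by_cases hk : x.1 = k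
      · have hyk : (y.1 == k) = false := by simp; omega
        have hnone : (y :: ys).filter (fun r => r.1 == k) = [] := by
          rw [List.filter_eq_nil_iff]
          intro a ha
          rcases List.mem_cons.mp ha with rfl | ha'
          · simpa using (by omega : ¬ a.1 = k)
          · have h1 := hy a ha'
            have h2 : ¬ (a.1 = k) := by omega
            simpa using h2
        simp [hk, hnone]
      · have hxk : (x.1 == k) = false := by simp [hk]
        simp [hk, hxk]
    · simp only [PySem.List.insertBy, decide_eq_true_eq, if_neg hlt]
      rw [List.filter_cons, List.filter_cons]
      rw [ih hys]
      by_cases hk : x.1 = k <;> split_ifs <;> simp [hk]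

theorem filter_key_sorted (xs : List (Int × Int × Int)) (k : Int) :
    (PySem.List.sorted xs (fun r => r.1)).filter (fun r => r.1 == k)
      = xs.filter (fun r => r.1 == k) := by
  induction xs using List.reverseRecOn with
  | nil => rfl
  | append_singleton xs x ih =>
    have hfold := PySem.List.sorted_eq_foldl_insertBy (xs ++ [x]) (fun r : Int × Int × Int => r.1)
    have hfold' := PySem.List.sorted_eq_foldl_insertBy xs (fun r : Int × Int × Int => r.1)
    rw [hfold, List.foldl_append, List.foldl_cons, List.foldl_nil, ← hfold']
    rw [filter_insertBy x _ k (PySem.List.sorted_pairwise xs (fun r => r.1))]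
    rw [List.filter_append, List.filter_cons, List.filter_nil]
    by_cases hk : x.1 = k <;> simp [hk, ih]

theorem groupOut_eq (s : List (Int × Int × Int)) (h : s.Pairwise (fun a b => a.1 ≤ b.1)) :
    groupOut s
      = (PySem.Set.ofList (s.map (·.1))).map
          (fun k => (k, (s.filter (fun r => r.1 == k)).foldl applyRec [0,0,0])) := by
  induction hn : s.length using Nat.strong_induction_on generalizing s with
  | _ n ih =>
  match s, h with
  | [], _ => rfl
  | r :: rs, h =>
    rw [List.pairwise_cons] at h
    obtain ⟨hr, hrs⟩ := h
    set g := rs.takeWhile (fun s => s.1 == r.1) with hg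
    set rest := rs.dropWhile (fun s => s.1 == r.1) with hrest
    have hsplit : rs = g ++ rest := (List.takeWhile_append_dropWhile).symm
    have hgk : ∀ a ∈ g, a.1 = r.1 := by
      intro a ha
      have := List.mem_takeWhile_imp ha
      simpa using this
    have hrestp : rest.Pairwise (fun a b => a.1 ≤ b.1) :=
      hrs.sublist (List.dropWhile_sublist _)
    have hrestgt : ∀ a ∈ rest, r.1 < a.1 := by
      cases hre : rest with
      | nil => simp
      | cons h0 t =>
        have hh0 : ¬ ((fun s => s.1 == r.1) h0 = true) := by
          have := List.head?_dropWhile_not (fun s => s.1 == r.1) rs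
          rw [← hrest, hre] at this
          simpa using this
        have hh0' : h0.1 ≠ r.1 := by simpa using hh0
        have hh0mem : h0 ∈ rs := by
          rw [hsplit, hre]; simp
        have hle : r.1 ≤ h0.1 := hr h0 hh0mem
        have h0lt : r.1 < h0.1 := lt_of_le_of_ne hle (fun h => hh0' h.symm)
        intro a ha
        rcases List.mem_cons.mp ha with rfl | ha'
        · exact h0lt
        · have : rest.Pairwise (fun a b => a.1 ≤ b.1) := hrestp
          rw [hre, List.pairwise_cons] at this
          exact lt_of_lt_of_le h0lt (this.1 a ha')
    have hrest_len : rest.length < n := by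
      have := List.length_dropWhile_le (fun s => s.1 == r.1) rs
      rw [← hrest] at this
      simp only [List.length_cons] at hn
      omega
    have hIH := ih rest.length hrest_len rest hrestp rfl
    have hnotin : r.1 ∉ rest.map (·.1) := by
      intro hmem
      obtain ⟨a, ha, hae⟩ := List.mem_map.mp hmem
      exact absurd hae (by have := hrestgt a ha; omega)
    -- the distinct keys of s are r.1 followed by those of rest
    have hkeys : PySem.Set.ofList ((r :: rs).map (·.1))
        = r.1 :: PySem.Set.ofList (rest.map (·.1)) := by
      have h1 : PySem.Set.ofList ((r :: rs).map (·.1))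
          = PySem.Set.update [r.1] (g.map (·.1) ++ rest.map (·.1)) := by
        rw [List.map_cons, hsplit, List.map_append]
        rfl
      rw [h1, PySem.Set.update, List.foldl_append, ← PySem.Set.update, ← PySem.Set.update]
      have hgabs : PySem.Set.update [r.1] (g.map (·.1)) = [r.1] :=
        set_update_of_subset _ _ (by
          intro a ha
          obtain ⟨b, hb, hbe⟩ := List.mem_map.mp ha
          simp [← hbe, hgk b hb])
      rw [hgabs]
      have hcu := set_cons_update (rest.map (·.1)) r.1 [] hnotin
      exact hcu
    -- the filter at key r.1 : the head record followed by its run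
    have hfilter_head : (r :: rs).filter (fun x => x.1 == r.1) = r :: g := by
      rw [List.filter_cons, if_pos (by simp)]
      rw [hsplit, List.filter_append]
      rw [List.filter_eq_self.mpr (fun a ha => by simp [hgk a ha])]
      rw [List.filter_eq_nil_iff.mpr (fun a ha => by
        have := hrestgt a ha
        simpa using (by omega : ¬ a.1 = r.1))]
      simp
    -- filters at the later keys ignore the head run
    have hfilter_tail : ∀ k ∈ PySem.Set.ofList (rest.map (·.1)),
        (r :: rs).filter (fun x => x.1 == k) = rest.filter (fun x => x.1 == k) := by
      intro k hk
      have hkmem : k ∈ rest.map (·.1) := by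
        have := set_ofList_sublist (rest.map (·.1))
        exact this.mem hk
      obtain ⟨b, hb, hbe⟩ := List.mem_map.mp hkmem
      have hkgt : r.1 < k := by have := hrestgt b hb; omega
      rw [List.filter_cons, if_neg (by simpa using (by omega : ¬ r.1 = k))]
      rw [hsplit, List.filter_append]
      rw [List.filter_eq_nil_iff.mpr (fun a ha => by
        have := hgk a ha
        simpa using (by omega : ¬ a.1 = k))]
      simp
    show groupRun r.1 (applyRec [0,0,0] r) rs = _
    rw [groupRun_eq, ← hg, ← hrest, hkeys, List.map_cons]
    congr 1
    · show (r.1, g.foldl applyRec (applyRec [0,0,0] r))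
        = (r.1, ((r :: rs).filter (fun x => x.1 == r.1)).foldl applyRec [0,0,0])
      rw [hfilter_head, List.foldl_cons]
    · rw [hIH]
      exact (List.map_congr_left (fun k hk => by
        show (k, ((r :: rs).filter (fun x => x.1 == k)).foldl applyRec [0,0,0])
          = (k, (rest.filter (fun x => x.1 == k)).foldl applyRec [0,0,0])
        rw [hfilter_tail k hk])).symm

theorem build_eq_alt (lc : List (Int × Int × Int)) : build lc = build_alt lc := by
  have hsp : (PySem.List.sorted lc (fun r => r.1)).Pairwise (fun a b => a.1 ≤ b.1) :=
    PySem.List.sorted_pairwise lc _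
  -- B's result, rewritten as a map over the distinct keys (in sorted order)
  have halt : build_alt lc
      = (PySem.Set.ofList ((PySem.List.sorted lc (fun r => r.1)).map (·.1))).map
          (fun k => (k, (lc.filter (fun r => r.1 == k)).foldl applyRec [0,0,0])) := by
    unfold build_alt
    rw [groupOut_eq _ hsp]
    exact List.map_congr_left (fun k _ => by
      show (k, ((PySem.List.sorted lc (fun r => r.1)).filter (fun x => x.1 == k)).foldl applyRec [0,0,0]) = _
      rw [filter_key_sorted])
  -- A's dict, rewritten as a map over the distinct keys (in first-occurrence order)
  set D := lc.foldl buildStep PySem.Dict.empty with hD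
  have hK : D.keys = PySem.Set.ofList (lc.map (·.1)) := by
    rw [hD, keys_foldl_buildStep]
    rw [PySem.Dict.keys_empty]
    rfl
  have hnd : D.keys.Nodup := by rw [hK]; exact PySem.Set.nodup_ofList _
  have hitems : D.items
      = D.keys.map (fun k => (k, (lc.filter (fun r => r.1 == k)).foldl applyRec [0,0,0])) := by
    rw [PySem.Dict.items_eq_map_keys D hnd []]
    exact List.map_congr_left (fun k hk => by
      have hc : D.contains k = true := (PySem.Dict.contains_iff_mem_keys _ _).mpr hk
      have hgf := gval_foldl lc PySem.Dict.empty k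
      simp only [gval, hc, if_true, PySem.Dict.contains_empty, Bool.false_eq_true,
        if_false, ← hD] at hgf
      show (k, D.getD k []) = _
      rw [hgf])
  -- B's key list is a permutation of A's, strictly increasing
  have hperm : (PySem.Set.ofList ((PySem.List.sorted lc (fun r => r.1)).map (·.1)) : List Int).Perm
      D.keys := by
    rw [hK]
    rw [List.perm_ext_iff_of_nodup (PySem.Set.nodup_ofList _) (PySem.Set.nodup_ofList _)]
    intro a
    rw [PySem.Set.mem_ofList, PySem.Set.mem_ofList, List.mem_map, List.mem_map]
    constructor <;> rintro ⟨b, hb, rfl⟩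
    · exact ⟨b, (PySem.List.sorted_perm lc _ _).mem_iff.mp hb, rfl⟩
    · exact ⟨b, (PySem.List.sorted_perm lc _ _).mem_iff.mpr hb, rfl⟩
  have hlt : (PySem.Set.ofList ((PySem.List.sorted lc (fun r => r.1)).map (·.1)) : List Int).Pairwise
      (· < ·) := by
    have hle : ((PySem.List.sorted lc (fun r => r.1)).map (·.1)).Pairwise (· ≤ ·) :=
      List.Pairwise.map _ (fun a b h => h) hsp
    have hle' := hle.sublist (set_ofList_sublist _)
    have hne := PySem.Set.nodup_ofList ((PySem.List.sorted lc (fun r => r.1)).map (·.1))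
    exact (hle'.and hne).imp (fun h => lt_of_le_of_ne h.1 h.2)
  -- name the sorted order of A's items: it is exactly B's list
  unfold build
  rw [← hD, halt]
  apply PySem.List.sorted_eq_of_perm_of_pairwise_lt
  · rw [hitems]
    exact hperm.map _
  · rw [List.pairwise_map]
    exact hlt

-- ===== VERDICT (by name: the statement is the Claim_ definition above) =====
theorem build_spec : Claim_equal_build := by
  intro lc _ _
  show build lc = build_alt lc
  exact build_eq_alt lc
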